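-- pv_equiv track=rewrite | github.com/k-roy/RECTIFY | rectify/core/multi_aligner.py | _subtract_introns_gtf
-- ===== SOURCE A (Python) =====
-- def _subtract_introns_gtf(tx_start: int, tx_end: int, intron_list: list) -> list:
--     """Return exon intervals (1-based closed) by subtracting introns from a transcript span."""
--     if not intron_list:
--         return [(tx_start, tx_end)]
--     exons = []
--     pos = tx_start
--     for i_start, i_end in sorted(intron_list):
--         if i_start > pos:
--             exons.append((pos, i_start - 1))
--         pos = max(pos, i_end + 1)
--     if pos <= tx_end:
--         exons.append((pos, tx_end))
--     return exons
-- ===== SOURCE B (Python) =====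
-- def _subtract_introns_gtf(tx_start: int, tx_end: int, intron_list: list) -> list:
--     """Return exon intervals (1-based closed) by subtracting introns from a transcript span."""
--     if not intron_list:
--         return [(tx_start, tx_end)]
--     introns = sorted(intron_list)
--     # Pass 1: left boundary of the exon candidate before each intron (and the final one):
--     # a running prefix-maximum of tx_start and the intron right ends + 1.
--     bounds = [tx_start]
--     m = tx_start
--     for _, i_end in introns:
--         m = max(m, i_end + 1)
--         bounds.append(m)
--     # Pass 2: cut points are the intron starts plus the sentinel tx_end + 1;
--     # each non-empty (boundary, cut) gap is an exon.
--     cuts = [i_start for i_start, _ in introns] + [tx_end + 1]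
--     return [(lo, cut - 1) for lo, cut in zip(bounds, cuts) if cut > lo]
-- ===== Notes on version B (the rewrite author's own statement) =====
-- stated objective: alternative
-- what changed: Replaces the single loop that interleaves conditional emission with position updates by a two-pass pipeline: first a prefix-maximum scan producing all exon left boundaries, then a zip of those boundaries with the intron-start cut points, filtered for non-empty gaps.
import Mathlib
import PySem

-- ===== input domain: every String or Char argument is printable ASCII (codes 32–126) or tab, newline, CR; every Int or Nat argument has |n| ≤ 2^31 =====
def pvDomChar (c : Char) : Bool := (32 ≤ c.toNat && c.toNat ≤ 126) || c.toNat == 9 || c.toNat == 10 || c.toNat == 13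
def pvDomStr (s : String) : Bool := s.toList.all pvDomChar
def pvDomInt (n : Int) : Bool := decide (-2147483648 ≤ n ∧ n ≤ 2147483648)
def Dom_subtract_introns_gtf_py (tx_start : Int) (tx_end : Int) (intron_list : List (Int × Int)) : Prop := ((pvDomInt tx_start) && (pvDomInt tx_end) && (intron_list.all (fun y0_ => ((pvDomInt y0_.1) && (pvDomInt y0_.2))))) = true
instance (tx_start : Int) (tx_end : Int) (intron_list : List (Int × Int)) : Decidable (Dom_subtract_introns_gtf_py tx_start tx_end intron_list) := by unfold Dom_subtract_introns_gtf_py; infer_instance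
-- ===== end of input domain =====

-- B restructures A's single emit-as-you-go loop into a prefix-maximum scan followed by a
-- zip/filter pass over the resulting boundaries (same cost; objective: alternative decomposition).

-- ===== PORT A =====
def subtract_introns_gtf_py (tx_start : Int) (tx_end : Int) (intron_list : List (Int × Int)) : List (Int × Int) :=
  if intron_list = [] then [(tx_start, tx_end)]
  else
    let st := (PySem.List.sorted2 intron_list Prod.fst Prod.snd).foldl
      (fun (st : List (Int × Int) × Int) p =>
        ((if p.1 > st.2 then st.1 ++ [(st.2, p.1 - 1)] else st.1), max st.2 (p.2 + 1)))
      ([], tx_start)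
    if st.2 ≤ tx_end then st.1 ++ [(st.2, tx_end)] else st.1

-- ===== PORT B =====
def subtract_introns_gtf_py_alt (tx_start : Int) (tx_end : Int) (intron_list : List (Int × Int)) : List (Int × Int) :=
  if intron_list = [] then [(tx_start, tx_end)]
  else
    let introns := PySem.List.sorted2 intron_list Prod.fst Prod.snd
    -- pass 1: prefix-maximum scan of the right ends + 1 (bounds, running max m)
    let bm := introns.foldl
      (fun (bm : List Int × Int) p =>
        let m := max bm.2 (p.2 + 1)
        (bm.1 ++ [m], m))
      ([tx_start], tx_start)
    -- pass 2: cut points = intron starts plus the sentinel tx_end + 1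
    let cuts := introns.map Prod.fst ++ [tx_end + 1]
    ((bm.1.zip cuts).filter (fun q => q.2 > q.1)).map (fun q => (q.1, q.2 - 1))

-- ===== PRECONDITION & SPEC =====
def Spec_subtract_introns_gtf_py (tx_start : Int) (tx_end : Int) (intron_list : List (Int × Int)) (out : List (Int × Int)) : Prop := out = subtract_introns_gtf_py_alt tx_start tx_end intron_list
instance (tx_start : Int) (tx_end : Int) (intron_list : List (Int × Int)) (out : List (Int × Int)) : Decidable (Spec_subtract_introns_gtf_py tx_start tx_end intron_list out) := by unfold Spec_subtract_introns_gtf_py; infer_instance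

-- ===== CLAIM (what is proved, stated in full; the proofs are below) =====
def Claim_equal_subtract_introns_gtf_py : Prop := ∀ (tx_start : Int) (tx_end : Int) (intron_list : List (Int × Int)), Dom_subtract_introns_gtf_py tx_start tx_end intron_list → Spec_subtract_introns_gtf_py tx_start tx_end intron_list (subtract_introns_gtf_py tx_start tx_end intron_list)

-- ===== LEMMAS AND PROOFS =====

-- the common reference value: exons emitted from position pos over intron list L
def pvEmit (tx_end : Int) (pos : Int) : List (Int × Int) → List (Int × Int)
  | [] => if pos ≤ tx_end then [(pos, tx_end)] else []
  | p :: t => (if p.1 > pos then [(pos, p.1 - 1)] else []) ++ pvEmit tx_end (max pos (p.2 + 1)) t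

-- A's loop with the exon accumulator pulled out
lemma aLoop_acc (L : List (Int × Int)) (ex : List (Int × Int)) (pos : Int) :
    L.foldl (fun (st : List (Int × Int) × Int) p =>
        ((if p.1 > st.2 then st.1 ++ [(st.2, p.1 - 1)] else st.1), max st.2 (p.2 + 1))) (ex, pos)
    = (ex ++ (L.foldl (fun (st : List (Int × Int) × Int) p =>
        ((if p.1 > st.2 then st.1 ++ [(st.2, p.1 - 1)] else st.1), max st.2 (p.2 + 1))) ([], pos)).1,
       (L.foldl (fun (st : List (Int × Int) × Int) p =>
        ((if p.1 > st.2 then st.1 ++ [(st.2, p.1 - 1)] else st.1), max st.2 (p.2 + 1))) ([], pos)).2) := by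
  induction L generalizing ex pos with
  | nil => simp
  | cons p t ih =>
    simp only [List.foldl_cons]
    by_cases hc : p.1 > pos
    · simp only [if_pos hc]
      rw [ih, ih ([] ++ [(pos, p.1 - 1)])]
      simp
    · simp only [if_neg hc]
      rw [ih]

-- the A side computes pvEmit
lemma a_eq_emit (L : List (Int × Int)) (tx_end pos : Int) :
    (let st := L.foldl (fun (st : List (Int × Int) × Int) p =>
        ((if p.1 > st.2 then st.1 ++ [(st.2, p.1 - 1)] else st.1), max st.2 (p.2 + 1))) ([], pos)
     if st.2 ≤ tx_end then st.1 ++ [(st.2, tx_end)] else st.1) = pvEmit tx_end pos L := by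
  induction L generalizing pos with
  | nil => simp [pvEmit]
  | cons p t ih =>
    simp only [List.foldl_cons, pvEmit]
    rw [aLoop_acc, ← ih (max pos (p.2 + 1))]
    by_cases hc : p.1 > pos
    · simp only [if_pos hc, List.singleton_append]
      split <;> simp
    · simp [hc]

-- B's scan with the bounds accumulator pulled out: the tail it appends
def pvScan (m : Int) : List (Int × Int) → List Int
  | [] => []
  | p :: t => max m (p.2 + 1) :: pvScan (max m (p.2 + 1)) t

lemma bLoop_acc (L : List (Int × Int)) (bs : List Int) (m : Int) :
    L.foldl (fun (bm : List Int × Int) p => (bm.1 ++ [max bm.2 (p.2 + 1)], max bm.2 (p.2 + 1))) (bs, m)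
    = (bs ++ pvScan m L,
       (L.foldl (fun (bm : List Int × Int) p => (bm.1 ++ [max bm.2 (p.2 + 1)], max bm.2 (p.2 + 1))) (bs, m)).2) := by
  induction L generalizing bs m with
  | nil => simp [pvScan]
  | cons p t ih =>
    simp only [List.foldl_cons, pvScan]
    rw [ih]
    simp

-- the B side computes pvEmit
lemma b_eq_emit (L : List (Int × Int)) (tx_end pos : Int) :
    (((pos :: pvScan pos L).zip (L.map Prod.fst ++ [tx_end + 1])).filter (fun q => q.2 > q.1)).map
        (fun q => (q.1, q.2 - 1)) = pvEmit tx_end pos L := by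
  induction L generalizing pos with
  | nil =>
    by_cases h : pos ≤ tx_end
    · simp [pvScan, pvEmit, h, List.filter, show pos < tx_end + 1 by omega]
    · simp [pvScan, pvEmit, h, List.filter, show ¬ pos < tx_end + 1 by omega]
  | cons p t ih =>
    simp only [pvScan, pvEmit, List.map_cons, List.cons_append, List.zip_cons_cons,
      List.filter_cons, List.map_cons]
    by_cases h : p.1 > pos
    · rw [if_pos (by simpa using h)]
      simp only [List.map_cons, ih]
      simp [h]
    · rw [if_neg (by simpa using h)]
      simp [h, ih]

-- ===== VERDICT (by name: the statement is the Claim_ definition above) =====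
theorem subtract_introns_gtf_py_spec : Claim_equal_subtract_introns_gtf_py := by
  intro tx_start tx_end intron_list _
  unfold Spec_subtract_introns_gtf_py subtract_introns_gtf_py subtract_introns_gtf_py_alt
  by_cases hnil : intron_list = []
  · simp [hnil]
  · simp only [if_neg hnil]
    rw [a_eq_emit (PySem.List.sorted2 intron_list Prod.fst Prod.snd) tx_end tx_start]
    rw [bLoop_acc]
    rw [List.singleton_append]
    rw [b_eq_emit]
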